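-- pv_equiv track=rewrite | github.com/solnator/chapter-11 | sss.py | is_valid_substitution_cipher
-- ===== SOURCE A (Python) =====
-- def is_valid_substitution_cipher(original, encoded):
--     if len(original) != len(encoded):
--         return False  # Lengths must match
--
--     mapping = {}  # Maps original letters to encoded letters
--     reverse_mapping = {}  # Ensures unique substitution (one-to-one)
--
--     for o, e in zip(original, encoded):
--         if o in mapping:
--             if mapping[o] != e:
--                 return False  # Inconsistent mapping
--         else:
--             if e in reverse_mapping:
--                 return False  # Ensures one-to-one mapping
--             mapping[o] = e
--             reverse_mapping[e] = o  # Reverse mapping to prevent reuse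
--
--     return True
-- ===== SOURCE B (Python) =====
-- def is_valid_substitution_cipher(original, encoded):
--     if len(original) != len(encoded):
--         return False
--     return len(set(original)) == len(set(encoded)) == len(set(zip(original, encoded)))
-- ===== Notes on version B (the rewrite author's own statement) =====
-- stated objective: idiomatic
-- what changed: Replaces the incremental forward/reverse dictionary loop with three distinct-element counts: the map is a bijection iff the number of distinct (original, encoded) pairs equals the number of distinct originals and the number of distinct encodeds.
import Mathlib
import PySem

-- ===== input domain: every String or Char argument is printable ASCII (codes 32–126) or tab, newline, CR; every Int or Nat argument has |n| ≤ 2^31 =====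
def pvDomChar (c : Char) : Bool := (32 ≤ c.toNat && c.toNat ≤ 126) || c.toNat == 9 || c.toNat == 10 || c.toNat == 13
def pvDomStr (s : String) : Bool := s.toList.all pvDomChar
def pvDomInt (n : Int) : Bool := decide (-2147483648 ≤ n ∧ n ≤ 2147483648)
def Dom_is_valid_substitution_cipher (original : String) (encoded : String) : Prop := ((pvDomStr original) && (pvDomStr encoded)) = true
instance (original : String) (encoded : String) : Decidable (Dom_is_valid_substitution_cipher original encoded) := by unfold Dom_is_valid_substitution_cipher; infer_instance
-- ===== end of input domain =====

-- B replaces A's incremental forward/reverse-dictionary loop by comparing three distinct-element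
-- counts (distinct originals, distinct encodeds, distinct pairs); objective: idiomatic, same cost.

-- ===== PORT A =====
-- the for-loop over zip(original, encoded) with the two dicts and early returns
def pvLoopA (m r : PySem.Dict Char Char) : List (Char × Char) → Bool
  | [] => true
  | (o, e) :: t =>
    match m.get? o with                        -- 'if o in mapping' / 'mapping[o]'
    | some e' => if e' ≠ e then false else pvLoopA m r t
    | none =>
      if (r.get? e).isSome then false          -- 'if e in reverse_mapping'
      else pvLoopA (m.insert o e) (r.insert e o) t

def is_valid_substitution_cipher (original : String) (encoded : String) : Bool :=
  if PySem.Str.len original ≠ PySem.Str.len encoded then false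
  else pvLoopA PySem.Dict.empty PySem.Dict.empty (original.toList.zip encoded.toList)

-- ===== PORT B =====
def is_valid_substitution_cipher_alt (original : String) (encoded : String) : Bool :=
  if PySem.Str.len original ≠ PySem.Str.len encoded then false
  else
    PySem.Set.len (PySem.Set.ofList original.toList) == PySem.Set.len (PySem.Set.ofList encoded.toList)
      && PySem.Set.len (PySem.Set.ofList encoded.toList)
          == PySem.Set.len (PySem.Set.ofList (original.toList.zip encoded.toList))

-- ===== PRECONDITION & SPEC =====
def Spec_is_valid_substitution_cipher (original : String) (encoded : String) (out : Bool) : Prop := out = is_valid_substitution_cipher_alt original encoded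
instance (original : String) (encoded : String) (out : Bool) : Decidable (Spec_is_valid_substitution_cipher original encoded out) := by unfold Spec_is_valid_substitution_cipher; infer_instance

-- ===== CLAIM (what is proved, stated in full; the proofs are below) =====
def Claim_equal_is_valid_substitution_cipher : Prop := ∀ (original : String) (encoded : String), Dom_is_valid_substitution_cipher original encoded → Spec_is_valid_substitution_cipher original encoded (is_valid_substitution_cipher original encoded)

-- ===== LEMMAS AND PROOFS =====

-- the common characterisation: the pair list describes a (partial) bijection
def pvCompat (l : List (Char × Char)) : Prop :=
  ∀ p ∈ l, ∀ q ∈ l, (p.1 = q.1 ↔ p.2 = q.2)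

theorem pvCompat_congr {l l' : List (Char × Char)} (h : ∀ x, x ∈ l ↔ x ∈ l') :
    pvCompat l ↔ pvCompat l' := by
  unfold pvCompat
  constructor <;> intro hc p hp q hq
  · exact hc p ((h p).2 hp) q ((h q).2 hq)
  · exact hc p ((h p).1 hp) q ((h q).1 hq)

theorem pvLoopA_iff (xs : List (Char × Char)) :
    ∀ (m r : PySem.Dict Char Char),
      (∀ o e, m.get? o = some e ↔ r.get? e = some o) →
      m.keys.Nodup → r.keys.Nodup →
      (pvLoopA m r xs = true ↔ pvCompat (m.items ++ xs)) := by
  induction xs with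
  | nil =>
    intro m r hinv hm _hr
    simp only [pvLoopA, List.append_nil, true_iff]
    rintro ⟨p1, p2⟩ hp ⟨q1, q2⟩ hq
    have hp' := PySem.Dict.get?_of_mem_items m hp hm
    have hq' := PySem.Dict.get?_of_mem_items m hq hm
    dsimp only
    constructor
    · intro h; subst h
      exact Option.some_inj.mp (hp'.symm.trans hq')
    · intro h
      have hpr := (hinv p1 p2).mp hp'
      have hqr := (hinv q1 q2).mp hq'
      rw [h] at hpr
      exact Option.some_inj.mp (hpr.symm.trans hqr)
  | cons hd t ih =>
    obtain ⟨o, e⟩ := hd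
    intro m r hinv hm hr
    cases hmo : m.get? o with
    | some e' =>
      by_cases he : e' = e
      · subst he
        have hmem : (o, e') ∈ m.items := PySem.Dict.mem_items_of_get?_eq_some m hmo
        simp only [pvLoopA, hmo, ne_eq, not_true_eq_false, if_false]
        rw [ih m r hinv hm hr]
        apply pvCompat_congr
        intro x
        simp only [List.mem_append, List.mem_cons]
        constructor
        · rintro (h | h)
          · exact Or.inl h
          · exact Or.inr (Or.inr h)
        · rintro (h | h | h)
          · exact Or.inl h
          · exact Or.inl (h ▸ hmem)
          · exact Or.inr h
      · simp only [pvLoopA, hmo, ne_eq, he, not_false_eq_true, if_true, Bool.false_eq_true,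
          false_iff]
        intro hc
        have hmem : (o, e') ∈ m.items := PySem.Dict.mem_items_of_get?_eq_some m hmo
        have := (hc (o, e') (by simp [hmem]) (o, e) (by simp)).mp rfl
        exact he this
    | none =>
      cases hre : r.get? e with
      | some o' =>
        simp only [pvLoopA, hmo, hre, Option.isSome_some, if_true, Bool.false_eq_true, false_iff]
        intro hc
        have hmo' : m.get? o' = some e := (hinv o' e).mpr hre
        have hmem : (o', e) ∈ m.items := PySem.Dict.mem_items_of_get?_eq_some m hmo'
        have ho : o' = o := (hc (o', e) (by simp [hmem]) (o, e) (by simp)).mpr rfl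
        rw [ho, hmo] at hmo'; simp at hmo'
      | none =>
        have hcont : m.contains o = false := by
          rw [PySem.Dict.contains_eq_isSome_get?, hmo]; rfl
        have hinv' : ∀ a b, (m.insert o e).get? a = some b ↔ (r.insert e o).get? b = some a := by
          intro a b
          rw [PySem.Dict.get?_insert, PySem.Dict.get?_insert]
          by_cases ha : a = o <;> by_cases hb : b = e
          · subst ha; subst hb; simp
          · subst ha
            simp only [if_neg hb]
            constructor
            · intro h; exact absurd (Option.some_inj.mp h).symm hb
            · intro h
              have h2 := (hinv a b).mpr h
              rw [hmo] at h2; simp at h2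
          · subst hb
            simp only [if_neg ha]
            constructor
            · intro h
              have h2 := (hinv a b).mp h
              rw [hre] at h2; simp at h2
            · intro h; exact absurd (Option.some_inj.mp h).symm ha
          · simp only [if_neg ha, if_neg hb]; exact hinv a b
        have hit : (m.insert o e).items = m.items ++ [(o, e)] :=
          PySem.Dict.items_insert_of_not_contains m e hcont
        simp only [pvLoopA, hmo, hre, Option.isSome_none]
        rw [if_neg (by simp), ih (m.insert o e) (r.insert e o) hinv'
            (PySem.Dict.nodup_keys_insert m o e hm) (PySem.Dict.nodup_keys_insert r e o hr), hit]
        apply pvCompat_congr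
        intro x
        simp only [List.append_assoc, List.singleton_append, List.mem_append, List.mem_cons]

theorem pvSetLen_eq_card {α : Type} [BEq α] [LawfulBEq α] [DecidableEq α] (xs : List α) :
    (PySem.Set.ofList xs).length = xs.toFinset.card := by
  have h1 : (PySem.Set.ofList xs).toFinset = xs.toFinset := by
    ext a; simp [List.mem_toFinset, PySem.Set.mem_ofList]
  rw [← h1, List.toFinset_card_of_nodup (PySem.Set.nodup_ofList xs)]

theorem pvCounts_iff (l : List (Char × Char)) :
    (((PySem.Set.ofList (l.map Prod.fst)).length = (PySem.Set.ofList l).length) ∧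
     ((PySem.Set.ofList (l.map Prod.snd)).length = (PySem.Set.ofList l).length)) ↔ pvCompat l := by
  rw [pvSetLen_eq_card, pvSetLen_eq_card, pvSetLen_eq_card]
  have hf : (l.map Prod.fst).toFinset = l.toFinset.image Prod.fst := by ext a; simp
  have hs : (l.map Prod.snd).toFinset = l.toFinset.image Prod.snd := by ext a; simp
  rw [hf, hs, Finset.card_image_iff, Finset.card_image_iff]
  constructor
  · rintro ⟨hif, his⟩ p hp q hq
    have hp' : p ∈ (l.toFinset : Set (Char × Char)) := by simp [hp]
    have hq' : q ∈ (l.toFinset : Set (Char × Char)) := by simp [hq]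
    constructor
    · intro h; exact congrArg Prod.snd (hif hp' hq' h)
    · intro h; exact congrArg Prod.fst (his hp' hq' h)
  · intro hc
    constructor
    · intro p hp q hq h
      have hp' : p ∈ l := by simpa using hp
      have hq' : q ∈ l := by simpa using hq
      exact Prod.ext h ((hc p hp' q hq').mp h)
    · intro p hp q hq h
      have hp' : p ∈ l := by simpa using hp
      have hq' : q ∈ l := by simpa using hq
      exact Prod.ext ((hc p hp' q hq').mpr h) h

-- ===== VERDICT (by name: the statement is the Claim_ definition above) =====
theorem is_valid_substitution_cipher_spec : Claim_equal_is_valid_substitution_cipher := by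
  intro original encoded _
  unfold Spec_is_valid_substitution_cipher is_valid_substitution_cipher is_valid_substitution_cipher_alt
  by_cases hlen : PySem.Str.len original = PySem.Str.len encoded
  case neg => rw [if_pos hlen, if_pos hlen]
  case pos =>
    rw [if_neg (not_not_intro hlen), if_neg (not_not_intro hlen)]
    have hlist : original.toList.length = encoded.toList.length := by
      simpa [PySem.Str.len] using hlen
    set l := original.toList.zip encoded.toList with hl
    have hfst : l.map Prod.fst = original.toList := List.map_fst_zip (le_of_eq hlist)
    have hsnd : l.map Prod.snd = encoded.toList := List.map_snd_zip (le_of_eq hlist.symm)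
    rw [Bool.eq_iff_iff]
    have hA : pvLoopA PySem.Dict.empty PySem.Dict.empty l = true ↔ pvCompat l := by
      have hemp : (PySem.Dict.empty : PySem.Dict Char Char).items = [] := rfl
      have h := pvLoopA_iff l PySem.Dict.empty PySem.Dict.empty
        (by intro o e; simp [PySem.Dict.get?_empty])
        PySem.Dict.nodup_keys_empty PySem.Dict.nodup_keys_empty
      rwa [hemp, List.nil_append] at h
    rw [hA, ← pvCounts_iff l, hfst, hsnd]
    simp only [PySem.Set.len, Bool.and_eq_true, beq_iff_eq, Int.natCast_inj]
    omega
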